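-- pv_equiv track=rewrite | github.com/jalalahmadi201820/CSV_TO_JSON | Main.py | returnIntentSet
-- ===== SOURCE A (Python) =====
-- from collections import defaultdict
--
-- def washString(list_string:str , intT:int ,intR:int):
--             InputText = list_string
--             InputText = InputText.replace('\\', ',')
--             if intT==1:
--                 InputText = InputText.replace ('t', ' ')
--             InputText = InputText.replace(':', ' ')
--             if intR==1:
--
--                 InputText = InputText.replace(']', ' ')
--                 InputText = InputText.replace('[', ' ')
--             else:
--                 InputText = InputText.replace (']', '')
--                 InputText = InputText.replace ('[', '')
--                 InputText = InputText.replace(' ','')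
--
--             InputText = InputText.replace('\'', ' ')
--             InputText = InputText.replace(',', ' ')
--
--             return InputText
--
-- def washList(list_str:list):
--     return_list:list=[]
--     for item in list_str:
--         return_list.append(washString(str(item),1,1))
--     return return_list
--
-- def intentWasher(intent_washer:str):
--     string_changer=intent_washer
--     string_changer = string_changer.replace ('[', '')
--     string_changer = string_changer.replace (']', '')
--     string_changer = string_changer.replace ('\'', '')
--     string_changer = string_changer.replace (' ', '')
--     return string_changer
--
-- def returnIntent(Intent_List:list , AllData:list):
--     y: int = 0
--     counter_item: int = 0
--     Container: list = []
--     Hash = defaultdict (list)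
--     string_changer: str
--
--     for item in Intent_List:
--
--
--         counter_item = 0
--         Container = []
--
--         for jtem in AllData:
--             counter_item = counter_item + 1
--
--             if str (jtem).count (intentWasher(str(item))) != 0:
--                 Container.append (counter_item - 1)
--
--         Hash[intentWasher(str(item))] = Container
--     return Hash
--
-- def returnIntentSet(AllData:list , Intent_List:list , Intent:str):
--     nthlist: list
--     newset = set ()
--     nthlist=returnIntent(Intent_List,AllData)[Intent]
--
--
--     Lastlist:list=[]
--     for item in nthlist:
--       Lastlist.append(AllData[int(item)])
--     for item in washList(Lastlist):
--       for jtem in str(item).split():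
--            #if str(jtem).find(',')==False:
--                 newset.add(jtem)
--     return newset
-- ===== SOURCE B (Python) =====
-- def washString(list_string: str, intT: int, intR: int):
--     s = list_string.replace('\\', ',')
--     if intT == 1:
--         s = s.replace('t', ' ')
--     s = s.replace(':', ' ')
--     if intR == 1:
--         s = s.replace(']', ' ').replace('[', ' ')
--     else:
--         s = s.replace(']', '').replace('[', '').replace(' ', '')
--     return s.replace('\'', ' ').replace(',', ' ')
--
-- def intentWasher(intent_washer: str):
--     s = intent_washer
--     for ch in ('[', ']', '\'', ' '):
--         s = s.replace(ch, '')
--     return s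
--
-- def returnIntentSet(AllData: list, Intent_List: list, Intent: str):
--     # one filter-and-tokenize pass; no index table, no index list, no refetch
--     valid = {intentWasher(str(i)) for i in Intent_List}
--     result = set()
--     if Intent not in valid:
--         return result
--     for row in AllData:
--         s = str(row)
--         if s.count(Intent) != 0:
--             for tok in washString(s, 1, 1).split():
--                 result.add(tok)
--     return result
-- ===== Notes on version B (the rewrite author's own statement) =====
-- stated objective: simpler
-- what changed: Replaces the build-an-index-table-then-refetch pipeline (defaultdict of match-index lists over every intent, index list, AllData re-indexing, intermediate washed list) with a membership check on the washed-intent set followed by a single filter-and-tokenize pass over AllData.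
import Mathlib
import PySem

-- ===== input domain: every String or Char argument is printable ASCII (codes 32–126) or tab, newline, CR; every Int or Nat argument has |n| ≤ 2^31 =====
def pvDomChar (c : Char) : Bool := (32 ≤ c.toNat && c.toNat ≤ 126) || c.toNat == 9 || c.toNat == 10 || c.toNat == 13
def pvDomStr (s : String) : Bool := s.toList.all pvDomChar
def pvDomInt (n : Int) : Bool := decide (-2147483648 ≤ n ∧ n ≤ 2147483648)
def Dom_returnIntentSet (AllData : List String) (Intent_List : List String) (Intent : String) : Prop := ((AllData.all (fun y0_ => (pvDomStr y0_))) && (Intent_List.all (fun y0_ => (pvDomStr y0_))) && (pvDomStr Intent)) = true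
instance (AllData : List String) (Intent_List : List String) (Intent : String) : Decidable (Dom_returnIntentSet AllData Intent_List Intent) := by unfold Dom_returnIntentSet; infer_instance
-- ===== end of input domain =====

-- B replaces A's index-table-then-refetch pipeline by one filter-and-tokenize pass (objective: simpler).

-- ===== PORT A =====
def washStringA (list_string : String) (intT : Int) (intR : Int) : String :=
  let t0 := PySem.Str.replace list_string "\\" ","
  let t1 := if intT == 1 then PySem.Str.replace t0 "t" " " else t0
  let t2 := PySem.Str.replace t1 ":" " "
  let t3 := if intR == 1 then
      PySem.Str.replace (PySem.Str.replace t2 "]" " ") "[" " "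
    else
      PySem.Str.replace (PySem.Str.replace (PySem.Str.replace t2 "]" "") "[" "") " " ""
  PySem.Str.replace (PySem.Str.replace t3 "'" " ") "," " "

def washListA (list_str : List String) : List String :=
  list_str.foldl (fun acc item => acc ++ [washStringA item 1 1]) []

def intentWasherA (intent_washer : String) : String :=
  PySem.Str.replace (PySem.Str.replace (PySem.Str.replace (PySem.Str.replace intent_washer "[" "") "]" "") "'" "") " " ""

-- the inner 'for jtem in AllData' loop of returnIntent, with its (counter_item, Container) state
def containerA (AllData : List String) (key : String) : Int × List Int :=
  AllData.foldl (fun st jtem =>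
    let counter := st.1 + 1
    if PySem.Str.count jtem key != 0 then (counter, st.2 ++ [counter - 1]) else (counter, st.2))
    ((0 : Int), ([] : List Int))

def returnIntentA (Intent_List : List String) (AllData : List String) : PySem.Dict String (List Int) :=
  Intent_List.foldl (fun Hash item =>
    Hash.insert (intentWasherA item) (containerA AllData (intentWasherA item)).2) PySem.Dict.empty

def returnIntentSet (AllData : List String) (Intent_List : List String) (Intent : String) : List String :=
  -- Hash is a defaultdict(list): a missing key reads as []
  let nthlist : List Int := ((returnIntentA Intent_List AllData).get? Intent).getD []
  -- indices in nthlist always lie in range, so the IndexError case (.getD "") is never taken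
  let Lastlist : List String :=
    nthlist.foldl (fun acc item => acc ++ [(PySem.List.pyGet? AllData item).getD ""]) []
  (washListA Lastlist).foldl
    (fun newset item => (PySem.Str.split₀ item).foldl (fun newset jtem => PySem.Set.add newset jtem) newset)
    PySem.Set.empty

-- ===== PORT B =====
def washStringB (list_string : String) (intT : Int) (intR : Int) : String :=
  let s := PySem.Str.replace list_string "\\" ","
  let s := if intT == 1 then PySem.Str.replace s "t" " " else s
  let s := PySem.Str.replace s ":" " "
  let s := if intR == 1 then
      PySem.Str.replace (PySem.Str.replace s "]" " ") "[" " "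
    else
      PySem.Str.replace (PySem.Str.replace (PySem.Str.replace s "]" "") "[" "") " " ""
  PySem.Str.replace (PySem.Str.replace s "'" " ") "," " "

-- the 'for ch in (…): s = s.replace(ch, "")' loop, unrolled over its four-element tuple
def intentWasherB (intent_washer : String) : String :=
  PySem.Str.replace (PySem.Str.replace (PySem.Str.replace (PySem.Str.replace intent_washer "[" "") "]" "") "'" "") " " ""

def returnIntentSet_alt (AllData : List String) (Intent_List : List String) (Intent : String) : List String :=
  let valid : PySem.Set String := PySem.Set.ofList (Intent_List.map (fun i => intentWasherB i))
  if !(PySem.Set.contains valid Intent) then PySem.Set.empty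
  else
    AllData.foldl (fun result row =>
      if PySem.Str.count row Intent != 0 then
        (PySem.Str.split₀ (washStringB row 1 1)).foldl (fun result tok => PySem.Set.add result tok) result
      else result) PySem.Set.empty

-- ===== PRECONDITION & SPEC =====
def Spec_returnIntentSet (AllData : List String) (Intent_List : List String) (Intent : String) (out : List String) : Prop := out = returnIntentSet_alt AllData Intent_List Intent
instance (AllData : List String) (Intent_List : List String) (Intent : String) (out : List String) : Decidable (Spec_returnIntentSet AllData Intent_List Intent out) := by unfold Spec_returnIntentSet; infer_instance

-- ===== CLAIM (what is proved, stated in full; the proofs are below) =====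
def Claim_equal_returnIntentSet : Prop := ∀ (AllData : List String) (Intent_List : List String) (Intent : String), Dom_returnIntentSet AllData Intent_List Intent → Spec_returnIntentSet AllData Intent_List Intent (returnIntentSet AllData Intent_List Intent)

-- ===== LEMMAS AND PROOFS =====

-- lookup in a dict built by inserting key-determined values
theorem pv_get?_foldl_insert (l : List String) (K : String → String) (V : String → List Int)
    (d : PySem.Dict String (List Int)) (k : String) :
    (l.foldl (fun d it => d.insert (K it) (V (K it))) d).get? k
      = if k ∈ l.map K then some (V k) else d.get? k := by
  induction l generalizing d with
  | nil => simp
  | cons it l ih =>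
      simp only [List.foldl_cons, List.map_cons, List.mem_cons]
      rw [ih, PySem.Dict.get?_insert]
      by_cases h : k ∈ l.map K
      · simp [h]
      · by_cases hk : k = K it <;> simp [h, hk]

theorem returnIntentA_get? (Intent_List AllData : List String) (k : String) :
    (returnIntentA Intent_List AllData).get? k
      = if k ∈ Intent_List.map intentWasherA then some (containerA AllData k).2 else none := by
  unfold returnIntentA
  simpa using pv_get?_foldl_insert Intent_List intentWasherA
    (fun k => (containerA AllData k).2) PySem.Dict.empty k

-- the match indices the inner loop collects, as a function of the start index
def pvIdx (key : String) : List String → Int → List Int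
  | [], _ => []
  | r :: L, c => if PySem.Str.count r key != 0 then c :: pvIdx key L (c + 1) else pvIdx key L (c + 1)

theorem containerA_snd_eq (key : String) :
    ∀ (L : List String) (c : Int) (acc : List Int),
      L.foldl (fun st jtem =>
          let counter := st.1 + 1
          if PySem.Str.count jtem key != 0 then (counter, st.2 ++ [counter - 1]) else (counter, st.2))
        (c, acc)
      = (c + L.length, acc ++ pvIdx key L c) := by
  intro L
  induction L with
  | nil => intro c acc; simp [pvIdx]
  | cons r L ih =>
      intro c acc
      cases hb : (PySem.Str.count r key != 0) with
      | true =>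
          simp only [List.foldl_cons, pvIdx, hb, if_pos]
          rw [ih]
          refine Prod.ext ?_ ?_
          · simp only [List.length_cons]; push_cast; ring
          · simp
      | false =>
          simp only [List.foldl_cons, pvIdx, hb, Bool.false_eq_true, if_false]
          rw [ih]
          refine Prod.ext ?_ ?_
          · simp only [List.length_cons]; push_cast; ring
          · rfl

theorem pvIdx_fetch (Intent : String) (AllData : List String) :
    ∀ (L : List String) (c : Nat), AllData.drop c = L →
      (pvIdx Intent L (c : Int)).map (fun i => (PySem.List.pyGet? AllData i).getD "")
        = L.filter (fun r => PySem.Str.count r Intent != 0) := by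
  intro L
  induction L with
  | nil => intro c _; simp [pvIdx]
  | cons r L ih =>
      intro c hdrop
      have hget : AllData[c]? = some r := by
        have h0 : (List.drop c AllData)[0]? = some r := by rw [hdrop]; rfl
        simpa [List.getElem?_drop] using h0
      have hdrop' : AllData.drop (c + 1) = L := by
        have h1 : AllData.drop (c + 1) = (AllData.drop c).drop 1 := by
          rw [List.drop_drop]
        rw [h1, hdrop]; rfl
      have hcast : ((c : Int) + 1) = ((c + 1 : Nat) : Int) := by push_cast; ring
      cases hb : (PySem.Str.count r Intent != 0) with
      | true =>
          simp only [pvIdx, hb, if_true, List.map_cons, List.filter_cons]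
          rw [hcast, ih (c + 1) hdrop']
          congr 1
          simp only [PySem.List.pyGet?_natCast, hget, Option.getD_some]
      | false =>
          simp only [pvIdx, hb, Bool.false_eq_true, if_false, List.filter_cons]
          rw [hcast]
          exact ih (c + 1) hdrop'

theorem pv_tokens_fused (p : String → Bool) (w : String → String) :
    ∀ (L : List String) (s : List String),
      ((L.filter p).map w).foldl
          (fun ns item => (PySem.Str.split₀ item).foldl (fun ns j => PySem.Set.add ns j) ns) s
        = L.foldl (fun res row =>
            if p row then (PySem.Str.split₀ (w row)).foldl (fun res tok => PySem.Set.add res tok) res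
            else res) s := by
  intro L
  induction L with
  | nil => intro s; rfl
  | cons r L ih =>
      intro s
      by_cases h : p r
      · simp only [List.filter_cons, h, if_pos, List.map_cons, List.foldl_cons]
        exact ih _
      · simp only [List.filter_cons, h, Bool.false_eq_true, List.foldl_cons, if_false]
        exact ih _

-- ===== VERDICT (by name: the statement is the Claim_ definition above) =====
theorem returnIntentSet_spec : Claim_equal_returnIntentSet := by
  intro AllData Intent_List Intent _
  unfold Spec_returnIntentSet returnIntentSet returnIntentSet_alt
  have hBA : intentWasherB = intentWasherA := rfl
  have hcontains : PySem.Set.contains (PySem.Set.ofList (Intent_List.map (fun i => intentWasherB i))) Intent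
      = decide (Intent ∈ Intent_List.map intentWasherA) := by
    by_cases h : Intent ∈ Intent_List.map intentWasherA
    · simp only [h, decide_true]
      rw [PySem.Set.contains_iff]
      rw [PySem.Set.mem_ofList]
      simpa [hBA] using h
    · simp only [h, decide_false]
      rw [← Bool.not_eq_true, PySem.Set.contains_iff, PySem.Set.mem_ofList]
      simpa [hBA] using h
  rw [returnIntentA_get?]
  by_cases hmem : Intent ∈ Intent_List.map intentWasherA
  · -- Intent is a washed intent: A collects exactly the rows whose count is nonzero
    simp only [hmem, if_pos, Option.getD_some, hcontains, decide_true, Bool.not_true,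
      Bool.false_eq_true, if_false]
    have hcont : (containerA AllData Intent).2 = pvIdx Intent AllData 0 := by
      unfold containerA
      rw [containerA_snd_eq]
      simp
    rw [hcont]
    rw [PySem.List.foldl_append_singleton_eq_map]
    simp only [List.nil_append]
    have hfetch := pvIdx_fetch Intent AllData AllData 0 (by simp)
    simp only [Nat.cast_zero] at hfetch
    rw [hfetch]
    have hwash : ∀ l, washListA l = l.map (fun item => washStringA item 1 1) := fun l => by
      unfold washListA; rw [PySem.List.foldl_append_singleton_eq_map]; simp
    rw [hwash]
    exact pv_tokens_fused (fun r => PySem.Str.count r Intent != 0) (fun item => washStringA item 1 1)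
      AllData PySem.Set.empty
  · simp only [hmem, hcontains, decide_false, Bool.not_false, if_true]
    rfl
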